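-- pv_equiv track=rewrite | github.com/Sathishr424/LeetcodeProblems | 2430-MaximumDeletionsonaString/2430-MaximumDeletionsonaString.py | deleteString
-- ===== SOURCE A (Python) =====
-- def deleteString(s: str) -> int:
--     n = len(s)
--
--     half = n // 2
--     dp = [[0] * n for _ in range(half + 1)]
--
--     for window in range(1, half + 1):
--         for i in range(window, n-window+1):
--             curr = s[i:i+window]
--             prev = s[i-window:i]
--             if curr == prev:
--                 dp[window][i-window] = 1
--
--     cache = [-1] * n
--     def rec(index):
--         if index == n: return 0
--         if cache[index] != -1: return cache[index]
--         dis = n - index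
--         ans = 1
--         for j in range(index, index + dis // 2):
--             window = j - index + 1
--             if dp[window][index]:
--                 ans = max(ans, rec(j+1) + 1)
--         cache[index] = ans
--         return ans
--
--     return rec(0)
-- ===== SOURCE B (Python) =====
-- def deleteString(s: str) -> int:
--     # LCP-table DP: lcp[i][j] (for j > i) = longest common prefix of s[i:] and s[j:],
--     # built in O(n^2); then f[i] = max operations for suffix s[i:], back to front.
--     n = len(s)
--     lcp = [[0] * (n + 1) for _ in range(n + 1)]
--     for i in range(n - 1, -1, -1):
--         row = lcp[i]
--         nxt = lcp[i + 1]
--         si = s[i]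
--         for j in range(n - 1, i, -1):
--             if si == s[j]:
--                 row[j] = nxt[j + 1] + 1
--     f = [0] * (n + 1)
--     for i in range(n - 1, -1, -1):
--         row = lcp[i]
--         best = 1
--         for L in range(1, (n - i) // 2 + 1):
--             if row[i + L] >= L:
--                 best = max(best, f[i + L] + 1)
--         f[i] = best
--     return f[0]
-- ===== Notes on version B (the rewrite author's own statement) =====
-- stated objective: faster
-- what changed: A's O(n^3)-ish precompute of per-window substring comparisons plus memoised top-down recursion is replaced by an O(n^2) longest-common-prefix DP table and an iterative bottom-up (back-to-front) DP array.
import Mathlib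
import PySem

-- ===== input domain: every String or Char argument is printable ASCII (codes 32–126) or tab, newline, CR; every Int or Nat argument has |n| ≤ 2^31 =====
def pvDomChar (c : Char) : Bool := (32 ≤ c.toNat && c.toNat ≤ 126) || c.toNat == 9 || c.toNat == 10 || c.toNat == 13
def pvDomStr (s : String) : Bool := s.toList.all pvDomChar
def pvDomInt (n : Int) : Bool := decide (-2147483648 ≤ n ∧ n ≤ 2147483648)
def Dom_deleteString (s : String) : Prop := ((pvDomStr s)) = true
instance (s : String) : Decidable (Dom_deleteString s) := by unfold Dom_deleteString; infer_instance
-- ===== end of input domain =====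

-- B replaces A's O(n^3)-style table of substring comparisons and memoised recursion by an
-- O(n^2) longest-common-prefix table and an iterative back-to-front DP (objective: faster).

-- table helpers shared by both ports: read/write entry (i, j) of a list-of-lists
def tget (t : List (List Int)) (i j : Nat) : Int := (t.getD i []).getD j 0
def tset (t : List (List Int)) (i j : Nat) (v : Int) : List (List Int) :=
  t.set i ((t.getD i []).set j v)

-- ===== PORT A =====
-- A's dp table: dp[window][i-window] = 1 iff s[i:i+window] == s[i-window:i]
def dpBuildA (sigma : List Char) (n half : Nat) : List (List Int) :=
  (PySem.List.pyRange 1 ((half : Int) + 1) 1).foldl (fun dp window =>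
    (PySem.List.pyRange window ((n : Int) - window + 1) 1).foldl (fun dp i =>
      let curr := PySem.List.slice sigma (some i) (some (i + window))
      let prev := PySem.List.slice sigma (some (i - window)) (some i)
      if curr = prev then tset dp window.toNat (i - window).toNat 1 else dp) dp)
    (List.replicate (half + 1) (List.replicate n 0))

-- A's memoised `rec`, ported as fuel recursion (the cache changes no returned value);
-- `List.range' index (dis / 2)` is Python's range(index, index + dis // 2)
def recA (dp : List (List Int)) (n : Nat) : Nat → Nat → Int
  | 0, _ => 0
  | fuel + 1, index =>
    if index = n then 0
    else
      let dis := n - index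
      (List.range' index (dis / 2)).foldl (fun ans j =>
        let window := j - index + 1
        if tget dp window index ≠ 0 then max ans (recA dp n fuel (j + 1) + 1) else ans) 1

def deleteString (s : String) : Int :=
  let sigma := s.toList
  let n := sigma.length
  let half := n / 2
  recA (dpBuildA sigma n half) n n 0

-- ===== PORT B =====
-- B's lcp table: lcp[i][j] (for j > i) = length of the longest common prefix of s[i:] and
-- s[j:]; `(List.range n).reverse` is Python's range(n-1, -1, -1) and
-- `(List.range' (i + 1) (n - i - 1)).reverse` is Python's range(n-1, i, -1); the Source B
-- locals row/nxt/si are aliases, written out here; indices are < n, so the getD default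
-- character is never read
def lcpBuild (sigma : List Char) (n : Nat) : List (List Int) :=
  (List.range n).reverse.foldl (fun t i =>
    (List.range' (i + 1) (n - i - 1)).reverse.foldl (fun t j =>
      if sigma.getD i 'a' = sigma.getD j 'a' then tset t i j (tget t (i + 1) (j + 1) + 1) else t) t)
    (List.replicate (n + 1) (List.replicate (n + 1) 0))

def deleteString_alt (s : String) : Int :=
  let sigma := s.toList
  let n := sigma.length
  let lcp := lcpBuild sigma n
  let f := (List.range n).reverse.foldl (fun f i =>
    let best := (List.range' 1 ((n - i) / 2)).foldl (fun best (L : Nat) =>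
      if (L : Int) ≤ tget lcp i (i + L) then max best (f.getD (i + L) 0 + 1) else best) 1
    f.set i best) (List.replicate (n + 1) 0)
  f.getD 0 0

-- ===== PRECONDITION & SPEC =====
def Spec_deleteString (s : String) (out : Int) : Prop := out = deleteString_alt s
instance (s : String) (out : Int) : Decidable (Spec_deleteString s out) := by unfold Spec_deleteString; infer_instance

-- ===== CLAIM (what is proved, stated in full; the proofs are below) =====
def Claim_equal_deleteString : Prop := ∀ (s : String), Dom_deleteString s → Spec_deleteString s (deleteString s)

-- ===== LEMMAS AND PROOFS =====

def tshape (t : List (List Int)) (r c : Nat) : Prop :=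
  t.length = r ∧ ∀ row ∈ t, row.length = c

theorem getD_set_self {α : Type} (l : List α) (i : Nat) (x d : α) (h : i < l.length) :
    (l.set i x).getD i d = x := by
  rw [List.getD_eq_getElem?_getD, List.getElem?_set_self h, Option.getD_some]

theorem getD_set_ne {α : Type} (l : List α) (i a : Nat) (x d : α) (h : a ≠ i) :
    (l.set i x).getD a d = l.getD a d := by
  rw [List.getD_eq_getElem?_getD, List.getElem?_set_ne (by omega : i ≠ a),
    ← List.getD_eq_getElem?_getD]

theorem tget_replicate (r c a b : Nat) : tget (List.replicate r (List.replicate c (0 : Int))) a b = 0 := by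
  simp only [tget, List.getD_eq_getElem?_getD, List.getElem?_replicate]
  split_ifs <;> simp

theorem tshape_replicate (r c : Nat) : tshape (List.replicate r (List.replicate c (0 : Int))) r c := by
  refine ⟨by simp, ?_⟩
  intro row hrow
  simp [List.eq_of_mem_replicate hrow]

theorem tshape_tset {t : List (List Int)} {r c : Nat} (h : tshape t r c) (i j : Nat) (v : Int) :
    tshape (tset t i j v) r c := by
  obtain ⟨hl, hrows⟩ := h
  by_cases hi : i < t.length
  · refine ⟨by simp [tset, hl], ?_⟩
    intro row hrow
    rcases List.mem_or_eq_of_mem_set hrow with h1 | h2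
    · exact hrows _ h1
    · subst h2
      rw [List.getD_eq_getElem t [] hi, List.length_set]
      exact hrows _ (List.getElem_mem hi)
  · rw [tset, List.set_eq_of_length_le (by omega)]
    exact ⟨hl, hrows⟩

theorem tget_tset_self {t : List (List Int)} {r c : Nat} (h : tshape t r c)
    (i j : Nat) (hi : i < r) (hj : j < c) (v : Int) : tget (tset t i j v) i j = v := by
  obtain ⟨hl, hrows⟩ := h
  have hi' : i < t.length := by omega
  have hjl : j < (t.getD i []).length := by
    rw [List.getD_eq_getElem t [] hi', hrows _ (List.getElem_mem hi')]; omega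
  rw [tget, tset, getD_set_self _ _ _ _ hi', getD_set_self _ _ _ _ hjl]

theorem tget_tset_ne {t : List (List Int)} (i j a b : Nat) (v : Int)
    (hne : a ≠ i ∨ b ≠ j) : tget (tset t i j v) a b = tget t a b := by
  by_cases ha : a = i
  · subst ha
    have hb : b ≠ j := by tauto
    by_cases hi : a < t.length
    · rw [tget, tset, getD_set_self _ _ _ _ hi, getD_set_ne _ _ _ _ _ hb, tget]
    · rw [tget, tset, List.set_eq_of_length_le (by omega), tget]
  · rw [tget, tset, getD_set_ne _ _ _ _ _ ha, tget]

def lcpLen : List Char → List Char → Nat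
  | a :: as, b :: bs => if a = b then lcpLen as bs + 1 else 0
  | _, _ => 0

theorem lcpLen_ge_iff (L : Nat) (a b : List Char) :
    L ≤ lcpLen a b ↔ (a.take L = b.take L ∧ L ≤ a.length ∧ L ≤ b.length) := by
  induction L generalizing a b with
  | zero => simp
  | succ L ih =>
    match a, b with
    | [], _ => simp [lcpLen]
    | x :: as, [] => simp [lcpLen]
    | x :: as, y :: bs =>
      by_cases hxy : x = y
      · subst hxy
        simp only [lcpLen, if_true, List.take_succ_cons, List.length_cons,
          Nat.add_le_add_iff_right, List.cons.injEq, true_and, ih]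
      · simp only [lcpLen, if_neg hxy, List.take_succ_cons, List.cons.injEq]
        constructor
        · omega
        · rintro ⟨⟨h1, -⟩, -⟩; exact absurd h1 hxy

def gSpec (sigma : List Char) (n : Nat) : Nat → Nat → Int
  | 0, _ => 0
  | fuel + 1, i =>
    if i = n then 0
    else
      (List.range' 1 ((n - i) / 2)).foldl (fun ans L =>
        if (sigma.drop i).take L = (sigma.drop (i + L)).take L then
          max ans (gSpec sigma n fuel (i + L) + 1)
        else ans) 1

theorem gSpec_n (sigma : List Char) (n fuel : Nat) : gSpec sigma n fuel n = 0 := by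
  cases fuel <;> simp [gSpec]

theorem gSpec_fuel (sigma : List Char) (n : Nat) (fuel fuel' i : Nat)
    (h : n - i ≤ fuel) (h' : n - i ≤ fuel') (hi : i ≤ n) :
    gSpec sigma n fuel i = gSpec sigma n fuel' i := by
  induction fuel generalizing fuel' i with
  | zero =>
    have : i = n := by omega
    subst this
    rw [gSpec_n, gSpec_n]
  | succ fuel ih =>
    cases fuel' with
    | zero =>
      have : i = n := by omega
      subst this
      rw [gSpec_n, gSpec_n]
    | succ fuel' =>
      by_cases hin : i = n
      · subst hin; rw [gSpec_n, gSpec_n]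
      · simp only [gSpec, if_neg hin]
        refine PySem.List.foldl_congr_mem _ _ _ _ ?_
        intro ans L hL
        have hL' : 1 ≤ L ∧ L < 1 + (n - i) / 2 := List.mem_range'_1.mp hL
        have h1 : n - (i + L) ≤ fuel := by omega
        have h2 : n - (i + L) ≤ fuel' := by omega
        rw [ih fuel' (i + L) h1 h2 (by omega)]

theorem dpA_inner (sigma : List Char) (n half : Nat) (hn : n = sigma.length) (w : Int)
    (hw1 : 1 ≤ w) (hwh : w ≤ (half : Int)) (is : List Int)
    (his : ∀ i ∈ is, w ≤ i ∧ i + w ≤ (n : Int)) (t : List (List Int))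
    (ht : tshape t (half + 1) n) :
    tshape (is.foldl (fun dp i =>
      let curr := PySem.List.slice sigma (some i) (some (i + w))
      let prev := PySem.List.slice sigma (some (i - w)) (some i)
      if curr = prev then tset dp w.toNat (i - w).toNat 1 else dp) t) (half + 1) n ∧
    ∀ a b, tget (is.foldl (fun dp i =>
      let curr := PySem.List.slice sigma (some i) (some (i + w))
      let prev := PySem.List.slice sigma (some (i - w)) (some i)
      if curr = prev then tset dp w.toNat (i - w).toNat 1 else dp) t) a b =
      if a = w.toNat ∧ (∃ i ∈ is, (i - w).toNat = b) ∧
          (sigma.drop b).take w.toNat = (sigma.drop (b + w.toNat)).take w.toNat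
      then 1 else tget t a b := by
  set F : List (List Int) → Int → List (List Int) := fun dp i =>
      let curr := PySem.List.slice sigma (some i) (some (i + w))
      let prev := PySem.List.slice sigma (some (i - w)) (some i)
      if curr = prev then tset dp w.toNat (i - w).toNat 1 else dp with hF
  induction is generalizing t with
  | nil => exact ⟨ht, fun a b => by simp⟩
  | cons i rest ih =>
    have hi := his i (List.mem_cons_self ..)
    have hrest : ∀ i' ∈ rest, w ≤ i' ∧ i' + w ≤ (n : Int) := fun i' h' => his i' (List.mem_cons_of_mem _ h')
    set bi : Nat := (i - w).toNat with hbi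
    have hiw : i.toNat = bi + w.toNat := by omega
    have hbin : bi + 2 * w.toNat ≤ n := by omega
    have hcond : (PySem.List.slice sigma (some i) (some (i + w)) =
        PySem.List.slice sigma (some (i - w)) (some i)) ↔
        ((sigma.drop bi).take w.toNat = (sigma.drop (bi + w.toNat)).take w.toNat) := by
      rw [PySem.List.slice_toNat _ (by omega) (by omega),
        PySem.List.slice_toNat _ (by omega) (by omega)]
      have e1 : (i + w).toNat - i.toNat = w.toNat := by omega
      have e2 : i.toNat - (i - w).toNat = w.toNat := by omega
      rw [e1, e2, ← hbi, hiw]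
      exact eq_comm
    set t' : List (List Int) := (if (sigma.drop bi).take w.toNat = (sigma.drop (bi + w.toNat)).take w.toNat
      then tset t w.toNat bi 1 else t) with ht'
    have hFt : F t i = t' := by
      rw [hF, ht']
      simp only
      split_ifs with h1 h2 h2
      · rfl
      · exact absurd (hcond.mp h1) h2
      · exact absurd (hcond.mpr h2) h1
      · rfl
    have ht'shape : tshape t' (half + 1) n := by
      rw [ht']; split_ifs
      · exact tshape_tset ht _ _ _
      · exact ht
    obtain ⟨hsh, hch⟩ := ih hrest t' ht'shape
    rw [List.foldl_cons, hFt]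
    refine ⟨hsh, ?_⟩
    intro a b
    rw [hch a b]
    by_cases hCrest : a = w.toNat ∧ (∃ i' ∈ rest, (i' - w).toNat = b) ∧
        (sigma.drop b).take w.toNat = (sigma.drop (b + w.toNat)).take w.toNat
    · rw [if_pos hCrest, if_pos]
      exact ⟨hCrest.1, ⟨hCrest.2.1.choose, List.mem_cons_of_mem _ hCrest.2.1.choose_spec.1,
        hCrest.2.1.choose_spec.2⟩, hCrest.2.2⟩
    · rw [if_neg hCrest]
      by_cases hCme : a = w.toNat ∧ b = bi ∧
          (sigma.drop b).take w.toNat = (sigma.drop (b + w.toNat)).take w.toNat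
      · obtain ⟨ha, hb, hc⟩ := hCme
        subst ha; subst hb
        rw [ht', if_pos hc, tget_tset_self ht _ _ (by omega) (by omega)]
        rw [if_pos ⟨rfl, ⟨i, List.mem_cons_self .., rfl⟩, hc⟩]
      · have hCcons : ¬ (a = w.toNat ∧ (∃ i' ∈ i :: rest, (i' - w).toNat = b) ∧
            (sigma.drop b).take w.toNat = (sigma.drop (b + w.toNat)).take w.toNat) := by
          rintro ⟨ha, ⟨i', hi', hbi'⟩, hc⟩
          rcases List.mem_cons.mp hi' with h | h
          · exact hCme ⟨ha, by rw [← hbi', h], hc⟩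
          · exact hCrest ⟨ha, ⟨i', h, hbi'⟩, hc⟩
        rw [if_neg hCcons, ht']
        split_ifs with hc
        · rw [tget_tset_ne]
          by_cases ha : a = w.toNat
          · subst ha
            right
            intro hb
            exact hCme ⟨rfl, hb, by rwa [hb]⟩
          · exact Or.inl ha
        · rfl

theorem dpA_outer (sigma : List Char) (n half : Nat) (hn : n = sigma.length)
    (ws : List Int) (hws : ∀ w ∈ ws, 1 ≤ w ∧ w ≤ (half : Int)) (t : List (List Int))
    (ht : tshape t (half + 1) n) :
    ∀ a b, tget (ws.foldl (fun dp window =>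
      (PySem.List.pyRange window ((n : Int) - window + 1) 1).foldl (fun dp i =>
        let curr := PySem.List.slice sigma (some i) (some (i + window))
        let prev := PySem.List.slice sigma (some (i - window)) (some i)
        if curr = prev then tset dp window.toNat (i - window).toNat 1 else dp) dp) t) a b =
      if ((a : Int) ∈ ws ∧ b + 2 * a ≤ n ∧
          (sigma.drop b).take a = (sigma.drop (b + a)).take a)
      then 1 else tget t a b := by
  induction ws generalizing t with
  | nil => intro a b; simp
  | cons w rest ih =>
    have hw := hws w (List.mem_cons_self ..)
    have hrest : ∀ w' ∈ rest, 1 ≤ w' ∧ w' ≤ (half : Int) := fun w' h' => hws w' (List.mem_cons_of_mem _ h')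
    have hisw : ∀ i ∈ PySem.List.pyRange w ((n : Int) - w + 1) 1, w ≤ i ∧ i + w ≤ (n : Int) := by
      intro i hi
      have := PySem.List.mem_pyRange_one.mp hi
      omega
    obtain ⟨hsh', hch'⟩ := dpA_inner sigma n half hn w hw.1 hw.2 _ hisw t ht
    intro a b
    rw [List.foldl_cons, ih hrest _ hsh', hch' a b]
    have hex : (∃ i ∈ PySem.List.pyRange w ((n : Int) - w + 1) 1, (i - w).toNat = b) ↔
        b + 2 * w.toNat ≤ n := by
      constructor
      · rintro ⟨i, hi, hbi⟩
        have := PySem.List.mem_pyRange_one.mp hi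
        omega
      · intro hb
        exact ⟨(b : Int) + w, PySem.List.mem_pyRange_one.mpr (by omega), by omega⟩
    by_cases hCrest : (a : Int) ∈ rest ∧ b + 2 * a ≤ n ∧
        (sigma.drop b).take a = (sigma.drop (b + a)).take a
    · rw [if_pos hCrest, if_pos ⟨List.mem_cons_of_mem _ hCrest.1, hCrest.2⟩]
    · rw [if_neg hCrest]
      by_cases hCme : a = w.toNat ∧ b + 2 * a ≤ n ∧
          (sigma.drop b).take a = (sigma.drop (b + a)).take a
      · obtain ⟨ha, hb, hc⟩ := hCme
        subst ha
        rw [if_pos ⟨rfl, hex.mpr hb, hc⟩, if_pos ⟨by rw [List.mem_cons]; left; omega, hb, hc⟩]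
      · have h1 : ¬ (a = w.toNat ∧ (∃ i ∈ PySem.List.pyRange w ((n : Int) - w + 1) 1, (i - w).toNat = b) ∧
            (sigma.drop b).take w.toNat = (sigma.drop (b + w.toNat)).take w.toNat) := by
          rintro ⟨ha, hbex, hc⟩
          subst ha
          exact hCme ⟨rfl, hex.mp hbex, hc⟩
        rw [if_neg h1, if_neg]
        rintro ⟨hmem, hb, hc⟩
        rcases List.mem_cons.mp hmem with h | h
        · exact hCme ⟨by omega, hb, hc⟩
        · exact hCrest ⟨h, hb, hc⟩

theorem dpBuildA_char (sigma : List Char) (n half : Nat) (hhalf : half = n / 2) (hn : n = sigma.length)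
    (a b : Nat) :
    tget (dpBuildA sigma n half) a b =
      if 1 ≤ a ∧ a ≤ half ∧ b + 2 * a ≤ n ∧ (sigma.drop b).take a = (sigma.drop (b + a)).take a
      then 1 else 0 := by
  have hws : ∀ w ∈ PySem.List.pyRange 1 ((half : Int) + 1) 1, 1 ≤ w ∧ w ≤ (half : Int) := by
    intro w hw
    have := PySem.List.mem_pyRange_one.mp hw
    omega
  rw [dpBuildA, dpA_outer sigma n half hn _ hws _ (tshape_replicate _ _), tget_replicate]
  have hmem : (a : Int) ∈ PySem.List.pyRange 1 ((half : Int) + 1) 1 ↔ 1 ≤ a ∧ a ≤ half := by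
    rw [PySem.List.mem_pyRange_one]; omega
  by_cases h : 1 ≤ a ∧ a ≤ half ∧ b + 2 * a ≤ n ∧ (sigma.drop b).take a = (sigma.drop (b + a)).take a
  · rw [if_pos ⟨hmem.mpr ⟨h.1, h.2.1⟩, h.2.2⟩, if_pos h]
  · rw [if_neg, if_neg h]
    rintro ⟨hm, hrest⟩
    exact h ⟨(hmem.mp hm).1, (hmem.mp hm).2, hrest⟩

theorem lcpLen_drop (sigma : List Char) (i j : Nat) (hi : i < sigma.length) (hj : j < sigma.length) :
    lcpLen (sigma.drop i) (sigma.drop j) =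
      if sigma[i] = sigma[j] then lcpLen (sigma.drop (i + 1)) (sigma.drop (j + 1)) + 1 else 0 := by
  conv_lhs => rw [← List.getElem_cons_drop (as := sigma) (i := i) (h := hi), ← List.getElem_cons_drop (as := sigma) (i := j) (h := hj)]
  simp [lcpLen]

theorem lcpLen_right_nil (a : List Char) : lcpLen a [] = 0 := by
  cases a <;> rfl

theorem lcpLen_left_nil (b : List Char) : lcpLen [] b = 0 := rfl

theorem lcp_inner (sigma : List Char) (n : Nat) (hn : n = sigma.length) (i : Nat) (hi : i < n)
    (js : List Nat) (hjs : ∀ j ∈ js, i < j ∧ j < n) (t : List (List Int))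
    (ht : tshape t (n + 1) (n + 1))
    (hnext : ∀ b, i + 1 < b → tget t (i + 1) b = (lcpLen (sigma.drop (i + 1)) (sigma.drop b) : Int))
    (hrow : ∀ b, tget t i b = 0 ∨ tget t i b = (lcpLen (sigma.drop i) (sigma.drop b) : Int)) :
    tshape (js.foldl (fun t j =>
      if sigma.getD i 'a' = sigma.getD j 'a' then tset t i j (tget t (i + 1) (j + 1) + 1) else t) t) (n + 1) (n + 1) ∧
    (∀ a b, a ≠ i → tget (js.foldl (fun t j =>
      if sigma.getD i 'a' = sigma.getD j 'a' then tset t i j (tget t (i + 1) (j + 1) + 1) else t) t) a b = tget t a b) ∧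
    (∀ b, b ∉ js → tget (js.foldl (fun t j =>
      if sigma.getD i 'a' = sigma.getD j 'a' then tset t i j (tget t (i + 1) (j + 1) + 1) else t) t) i b = tget t i b) ∧
    (∀ b ∈ js, tget (js.foldl (fun t j =>
      if sigma.getD i 'a' = sigma.getD j 'a' then tset t i j (tget t (i + 1) (j + 1) + 1) else t) t) i b = (lcpLen (sigma.drop i) (sigma.drop b) : Int)) := by
  set F : List (List Int) → Nat → List (List Int) := fun t j =>
      if sigma.getD i 'a' = sigma.getD j 'a' then tset t i j (tget t (i + 1) (j + 1) + 1) else t with hF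
  induction js generalizing t with
  | nil => exact ⟨ht, fun a b _ => rfl, fun b _ => rfl, fun b hb => absurd hb (List.not_mem_nil)⟩
  | cons j js ih =>
    have hj := hjs j (List.mem_cons_self ..)
    have hjs' : ∀ j' ∈ js, i < j' ∧ j' < n := fun j' h' => hjs j' (List.mem_cons_of_mem _ h')
    have hgi : sigma.getD i 'a' = sigma[i]'(by omega) := List.getD_eq_getElem sigma 'a' (by omega)
    have hgj : sigma.getD j 'a' = sigma[j]'(by omega) := List.getD_eq_getElem sigma 'a' (by omega)
    have hLij : (lcpLen (sigma.drop i) (sigma.drop j) : Int) =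
        if sigma[i]'(by omega) = sigma[j]'(by omega) then (lcpLen (sigma.drop (i+1)) (sigma.drop (j+1)) : Int) + 1 else 0 := by
      rw [lcpLen_drop sigma i j (by omega) (by omega)]
      split_ifs <;> simp
    -- the step leaves a table whose (i, j) entry is lcpLen (drop i) (drop j) and others unchanged
    have hstep_shape : tshape (F t j) (n + 1) (n + 1) := by
      rw [hF]; simp only
      split_ifs
      · exact tshape_tset ht _ _ _
      · exact ht
    have hstep_ne : ∀ a b, a ≠ i → tget (F t j) a b = tget t a b := by
      intro a b ha
      rw [hF]; simp only
      split_ifs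
      · rw [tget_tset_ne _ _ _ _ _ (Or.inl ha)]
      · rfl
    have hstep_nej : ∀ b, b ≠ j → tget (F t j) i b = tget t i b := by
      intro b hb
      rw [hF]; simp only
      split_ifs
      · rw [tget_tset_ne _ _ _ _ _ (Or.inr hb)]
      · rfl
    have hstep_j : tget (F t j) i j = 0 ∨ tget (F t j) i j = (lcpLen (sigma.drop i) (sigma.drop j) : Int) := by
      rw [hF]; simp only
      rw [hgi, hgj]
      split_ifs with hc
      · right
        rw [tget_tset_self ht _ _ (by omega) (by omega), hnext (j + 1) (by omega), hLij, if_pos hc]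
      · rcases hrow j with h | h
        · exact Or.inl h
        · exact Or.inr h
    have hstep_j_eq : sigma.getD i 'a' = sigma.getD j 'a' → tget (F t j) i j = (lcpLen (sigma.drop i) (sigma.drop j) : Int) := by
      intro hc
      rw [hF]; simp only [if_pos hc]
      rw [tget_tset_self ht _ _ (by omega) (by omega), hnext (j + 1) (by omega), hLij,
        if_pos (by rw [← hgi, ← hgj]; exact hc)]
    have hstep_j_ne : ¬ (sigma.getD i 'a' = sigma.getD j 'a') → tget (F t j) i j = tget t i j := by
      intro hc
      rw [hF]; simp only [if_neg hc]
    have hnext' : ∀ b, i + 1 < b → tget (F t j) (i + 1) b = (lcpLen (sigma.drop (i + 1)) (sigma.drop b) : Int) := by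
      intro b hb
      rw [hstep_ne _ _ (by omega), hnext b hb]
    have hrow' : ∀ b, tget (F t j) i b = 0 ∨ tget (F t j) i b = (lcpLen (sigma.drop i) (sigma.drop b) : Int) := by
      intro b
      by_cases hb : b = j
      · subst hb; exact hstep_j
      · rw [hstep_nej _ hb]; exact hrow b
    obtain ⟨ih1, ih2, ih3, ih4⟩ := ih hjs' (F t j) hstep_shape hnext' hrow'
    rw [List.foldl_cons]
    refine ⟨ih1, ?_, ?_, ?_⟩
    · intro a b ha
      rw [ih2 a b ha, hstep_ne a b ha]
    · intro b hb
      have hbj : b ≠ j := fun h => hb (h ▸ List.mem_cons_self ..)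
      have hbjs : b ∉ js := fun h => hb (List.mem_cons_of_mem _ h)
      rw [ih3 b hbjs, hstep_nej b hbj]
    · intro b hb
      rcases List.mem_cons.mp hb with hb1 | hb1
      · subst hb1
        by_cases hbjs : b ∈ js
        · exact ih4 b hbjs
        · rw [ih3 b hbjs]
          by_cases hc : sigma.getD i 'a' = sigma.getD b 'a'
          · exact hstep_j_eq hc
          · rw [hstep_j_ne hc]
            rcases hrow b with h | h
            · rw [h]
              have : lcpLen (sigma.drop i) (sigma.drop b) = 0 := by
                rw [lcpLen_drop sigma i b (by omega) (by omega), if_neg]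
                rw [hgi, List.getD_eq_getElem sigma 'a' (show b < sigma.length by omega)] at hc
                exact hc
              rw [this]; rfl
            · exact h
      · exact ih4 b hb1

theorem lcpLen_drop_ge (sigma : List Char) (a b : Nat) (ha : sigma.length ≤ a) :
    lcpLen (sigma.drop a) (sigma.drop b) = 0 := by
  rw [List.drop_eq_nil_of_le ha, lcpLen_left_nil]

theorem lcp_outer (sigma : List Char) (n : Nat) (hn : n = sigma.length) (k : Nat) (hk : k ≤ n)
    (t : List (List Int)) (ht : tshape t (n + 1) (n + 1))
    (hdone : ∀ a b, k ≤ a → a < b → tget t a b = (lcpLen (sigma.drop a) (sigma.drop b) : Int))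
    (htodo : ∀ a b, a < k → tget t a b = 0) :
    ∀ a b, a < b → tget ((List.range k).reverse.foldl (fun t i =>
      (List.range' (i + 1) (n - i - 1)).reverse.foldl (fun t j =>
        if sigma.getD i 'a' = sigma.getD j 'a' then tset t i j (tget t (i + 1) (j + 1) + 1) else t) t) t) a b =
      (lcpLen (sigma.drop a) (sigma.drop b) : Int) := by
  induction k generalizing t with
  | zero => intro a b hab; simpa using hdone a b (by omega) hab
  | succ k ih =>
    have hrange : (List.range (k + 1)).reverse = k :: (List.range k).reverse := by
      rw [List.range_succ, List.reverse_append]; rfl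
    rw [hrange, List.foldl_cons]
    have hjs : ∀ j ∈ (List.range' (k + 1) (n - k - 1)).reverse, k < j ∧ j < n := by
      intro j hj
      rw [List.mem_reverse, List.mem_range'_1] at hj
      omega
    obtain ⟨h1, h2, h3, h4⟩ := lcp_inner sigma n hn k (by omega) _ hjs t ht
      (fun b hb => hdone (k + 1) b (by omega) hb)
      (fun b => Or.inl (htodo k b (by omega)))
    apply ih (by omega) _ h1
    · intro a b ha hab
      by_cases hak : a = k
      · subst hak
        by_cases hbn : b ∈ (List.range' (a + 1) (n - a - 1)).reverse
        · exact h4 b hbn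
        · rw [h3 b hbn, htodo a b (by omega)]
          have hbn' : n ≤ b := by
            by_contra hlt
            exact hbn (List.mem_reverse.mpr (List.mem_range'_1.mpr (by omega)))
          rw [show List.drop b sigma = [] from List.drop_eq_nil_of_le (by omega), lcpLen_right_nil]; rfl
      · rw [h2 a b hak, hdone a b (by omega) hab]
    · intro a b ha
      rw [h2 a b (by omega), htodo a b (by omega)]

theorem lcpBuild_char (sigma : List Char) (n : Nat) (hn : n = sigma.length) (a b : Nat)
    (hab : a < b) :
    tget (lcpBuild sigma n) a b = (lcpLen (sigma.drop a) (sigma.drop b) : Int) := by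
  rw [lcpBuild]
  apply lcp_outer sigma n hn n (by omega) _ (tshape_replicate _ _) _ _ a b hab
  · intro a b ha _
    rw [tget_replicate, lcpLen_drop_ge sigma a b (by omega)]; rfl
  · intro a b _
    rw [tget_replicate]

theorem recA_eq_gSpec (sigma : List Char) (n : Nat) (hn : n = sigma.length) (fuel i : Nat)
    (h : n - i ≤ fuel) (hi : i ≤ n) :
    recA (dpBuildA sigma n (n / 2)) n fuel i = gSpec sigma n fuel i := by
  induction fuel generalizing i with
  | zero => rfl
  | succ fuel ih =>
    by_cases hin : i = n
    · subst hin; simp [recA, gSpec]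
    · simp only [recA, gSpec, if_neg hin]
      rw [List.range'_eq_map_range, List.range'_eq_map_range, List.foldl_map, List.foldl_map]
      refine PySem.List.foldl_congr_mem _ _ _ _ ?_
      intro ans m hm
      rw [List.mem_range] at hm
      have hw : (i + m) - i + 1 = m + 1 := by omega
      have hbound : i + 2 * (m + 1) ≤ n := by omega
      have hhalf : m + 1 ≤ n / 2 := by omega
      have hrec : recA (dpBuildA sigma n (n / 2)) n fuel (i + m + 1) = gSpec sigma n fuel (i + (m + 1)) := by
        rw [show i + (m + 1) = i + m + 1 by omega]
        exact ih (i + m + 1) (by omega) (by omega)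
      rw [hw]
      by_cases hc : (sigma.drop i).take (m + 1) = (sigma.drop (i + (m + 1))).take (m + 1)
      · have hval : tget (dpBuildA sigma n (n / 2)) (m + 1) i = 1 := by
          rw [dpBuildA_char sigma n (n / 2) rfl hn (m + 1) i]
          exact if_pos ⟨by omega, hhalf, hbound, hc⟩
        rw [hval, show (1 : Nat) + m = m + 1 from by omega, if_pos hc,
          if_pos (show (1 : Int) ≠ 0 by norm_num), hrec]
      · have hval : tget (dpBuildA sigma n (n / 2)) (m + 1) i = 0 := by
          rw [dpBuildA_char sigma n (n / 2) rfl hn (m + 1) i]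
          exact if_neg (by rintro ⟨-, -, -, hcc⟩; exact hc hcc)
        rw [hval, show (1 : Nat) + m = m + 1 from by omega, if_neg hc,
          if_neg (show ¬ (0 : Int) ≠ 0 by norm_num)]

theorem f_fold (sigma : List Char) (n : Nat) (hn : n = sigma.length) (k : Nat) (hk : k ≤ n)
    (f : List Int) (hlen : f.length = n + 1)
    (hf : ∀ m, k ≤ m → f.getD m 0 = gSpec sigma n (n - m) m) :
    ((List.range k).reverse.foldl (fun f i =>
      let best := (List.range' 1 ((n - i) / 2)).foldl (fun best (L : Nat) =>
        if (L : Int) ≤ tget (lcpBuild sigma n) i (i + L) then max best (f.getD (i + L) 0 + 1) else best) 1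
      f.set i best) f).length = n + 1 ∧
    ∀ m, ((List.range k).reverse.foldl (fun f i =>
      let best := (List.range' 1 ((n - i) / 2)).foldl (fun best (L : Nat) =>
        if (L : Int) ≤ tget (lcpBuild sigma n) i (i + L) then max best (f.getD (i + L) 0 + 1) else best) 1
      f.set i best) f).getD m 0 = if m < k then gSpec sigma n (n - m) m else f.getD m 0 := by
  induction k generalizing f with
  | zero => exact ⟨hlen, fun m => by simp⟩
  | succ k ih =>
    have hrange : (List.range (k + 1)).reverse = k :: (List.range k).reverse := by
      rw [List.range_succ, List.reverse_append]; rfl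
    rw [hrange, List.foldl_cons]
    have hbest : (List.range' 1 ((n - k) / 2)).foldl (fun best (L : Nat) =>
        if (L : Int) ≤ tget (lcpBuild sigma n) k (k + L) then max best (f.getD (k + L) 0 + 1) else best) 1 =
        gSpec sigma n (n - k) k := by
      have hnk : n - k = (n - k - 1) + 1 := by omega
      conv_rhs => rw [hnk]
      rw [gSpec, if_neg (by omega)]
      refine PySem.List.foldl_congr_mem _ _ _ _ ?_
      intro best L hL
      rw [List.mem_range'_1] at hL
      have h2L : 2 * L ≤ n - k := by
        have := Nat.div_mul_le_self (n - k) 2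
        omega
      have hcond : ((L : Int) ≤ tget (lcpBuild sigma n) k (k + L)) ↔
          (sigma.drop k).take L = (sigma.drop (k + L)).take L := by
        rw [lcpBuild_char sigma n hn k (k + L) (by omega), Nat.cast_le, lcpLen_ge_iff]
        constructor
        · exact fun h => h.1
        · intro h
          refine ⟨h, ?_, ?_⟩ <;> rw [List.length_drop] <;> omega
      have hval : f.getD (k + L) 0 = gSpec sigma n (n - k - 1) (k + L) := by
        rw [hf (k + L) (by omega)]
        exact gSpec_fuel sigma n _ _ _ (by omega) (by omega) (by omega)
      rw [hval]
      by_cases hc : (sigma.drop k).take L = (sigma.drop (k + L)).take L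
      · rw [if_pos (hcond.mpr hc), if_pos hc]
      · rw [if_neg (fun h => hc (hcond.mp h)), if_neg hc]
    set f' := f.set k ((List.range' 1 ((n - k) / 2)).foldl (fun best (L : Nat) =>
        if (L : Int) ≤ tget (lcpBuild sigma n) k (k + L) then max best (f.getD (k + L) 0 + 1) else best) 1) with hf'
    have hf'len : f'.length = n + 1 := by rw [hf', List.length_set, hlen]
    have hf'prop : ∀ m, k ≤ m → f'.getD m 0 = gSpec sigma n (n - m) m := by
      intro m hm
      by_cases hmk : m = k
      · subst hmk
        rw [hf', getD_set_self _ _ _ _ (by omega), hbest]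
      · rw [hf', getD_set_ne _ _ _ _ _ hmk, hf m (by omega)]
    obtain ⟨ih1, ih2⟩ := ih (by omega) f' hf'len hf'prop
    refine ⟨ih1, ?_⟩
    intro m
    rw [ih2 m]
    by_cases hmk : m < k
    · rw [if_pos hmk, if_pos (by omega)]
    · rw [if_neg hmk]
      by_cases hmk' : m = k
      · subst hmk'
        rw [if_pos (by omega), hf', getD_set_self _ _ _ _ (by omega), hbest]
      · rw [if_neg (by omega), hf', getD_set_ne _ _ _ _ _ hmk']

theorem getD_zero_replicate (n m : Nat) : (List.replicate n (0 : Int)).getD m 0 = 0 := by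
  rw [List.getD_eq_getElem?_getD, List.getElem?_replicate]
  split_ifs <;> simp

-- ===== VERDICT (by name: the statement is the Claim_ definition above) =====
theorem deleteString_spec : Claim_equal_deleteString := by
  intro s _
  unfold Spec_deleteString
  have hA : deleteString s = recA (dpBuildA s.toList s.toList.length (s.toList.length / 2))
      s.toList.length s.toList.length 0 := rfl
  have hB : deleteString_alt s = ((List.range s.toList.length).reverse.foldl (fun f i =>
      let best := (List.range' 1 ((s.toList.length - i) / 2)).foldl (fun best (L : Nat) =>
        if (L : Int) ≤ tget (lcpBuild s.toList s.toList.length) i (i + L) then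
          max best (f.getD (i + L) 0 + 1) else best) 1
      f.set i best) (List.replicate (s.toList.length + 1) 0)).getD 0 0 := rfl
  rw [hA, hB]
  obtain ⟨-, h2⟩ := f_fold s.toList s.toList.length rfl s.toList.length le_rfl
    (List.replicate (s.toList.length + 1) 0) (by simp)
    (fun m hm => by
      rw [getD_zero_replicate, show s.toList.length - m = 0 from by omega]
      rfl)
  rw [h2 0]
  by_cases hn : 0 < s.toList.length
  · rw [if_pos hn, Nat.sub_zero,
      recA_eq_gSpec s.toList s.toList.length rfl s.toList.length 0 (by omega) (by omega)]
  · rw [if_neg hn, getD_zero_replicate,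
      recA_eq_gSpec s.toList s.toList.length rfl s.toList.length 0 (by omega) (by omega),
      show s.toList.length = 0 from by omega]
    rfl
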